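-- pv_equiv track=rewrite | github.com/GiseleMacedoHijazin/atitus_pensComp_aulas | 05_Listas,_tuplas_e_lacos_de_repeticao/losango.py | desenha_losango
-- ===== SOURCE A (Python) =====
-- def desenha_losango(altura):
--     if altura % 2 == 0:
--         altura += 1
--
--     meio = altura // 2
--     linhas = []
--
--     for linha in range(altura):
--         if linha <= meio:
--             espacos = meio - linha
--             estrelas = linha * 2 + 1
--         else:
--             espacos = linha - meio
--             estrelas = altura - (linha - meio) * 2
--
--         linhas.append(' ' * espacos + '#' * estrelas)
--
--     return linhas
-- ===== SOURCE B (Python) =====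
-- def desenha_losango(altura):
--     if altura % 2 == 0:
--         altura += 1
--     meio = altura // 2
--     top = [' ' * (meio - linha) + '#' * (2 * linha + 1) for linha in range(meio + 1)]
--     return top + top[:-1][::-1]
-- ===== Notes on version B (the rewrite author's own statement) =====
-- stated objective: simpler
-- what changed: B builds only the top half of the diamond with a comprehension and mirrors it (top + top[:-1][::-1]) instead of A's full loop with an if/else distinguishing the halves.
import Mathlib
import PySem

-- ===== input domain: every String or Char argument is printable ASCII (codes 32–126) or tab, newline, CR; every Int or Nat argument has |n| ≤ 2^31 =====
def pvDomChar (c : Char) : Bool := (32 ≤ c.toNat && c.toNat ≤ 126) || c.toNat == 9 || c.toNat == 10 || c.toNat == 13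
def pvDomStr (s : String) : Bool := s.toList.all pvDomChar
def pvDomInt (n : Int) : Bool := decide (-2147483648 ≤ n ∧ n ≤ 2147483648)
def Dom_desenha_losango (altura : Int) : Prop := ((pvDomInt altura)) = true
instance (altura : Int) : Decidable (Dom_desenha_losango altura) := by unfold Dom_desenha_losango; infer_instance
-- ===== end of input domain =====

-- B builds only the top half and mirrors it instead of A's full loop with an if/else by half; same cost, simpler.

-- ===== PORT A =====
-- 'linhas.append(...)' with ' '*k / '#'*k ported via PySem.List.pyRepeat over chars (exact: negative count gives '').
def desenha_losango (altura0 : Int) : List String :=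
  let altura := if PySem.Int.mod altura0 2 = 0 then altura0 + 1 else altura0
  let meio := PySem.Int.floordiv altura 2
  (PySem.List.pyRange 0 altura 1).foldl (fun linhas linha =>
    let ee := if linha ≤ meio then (meio - linha, linha * 2 + 1)
              else (linha - meio, altura - (linha - meio) * 2)
    linhas ++ [String.ofList (PySem.List.pyRepeat [' '] ee.1 ++ PySem.List.pyRepeat ['#'] ee.2)]) []

-- ===== PORT B =====
-- top[:-1] is dropLast, [::-1] is reverse (exact for these slices).
def desenha_losango_alt (altura0 : Int) : List String :=
  let altura := if PySem.Int.mod altura0 2 = 0 then altura0 + 1 else altura0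
  let meio := PySem.Int.floordiv altura 2
  let top := (PySem.List.pyRange 0 (meio + 1) 1).map (fun linha =>
    String.ofList (PySem.List.pyRepeat [' '] (meio - linha) ++ PySem.List.pyRepeat ['#'] (2 * linha + 1)))
  top ++ top.dropLast.reverse

-- ===== PRECONDITION & SPEC =====
def Spec_desenha_losango (altura : Int) (out : List String) : Prop := out = desenha_losango_alt altura
instance (altura : Int) (out : List String) : Decidable (Spec_desenha_losango altura out) := by unfold Spec_desenha_losango; infer_instance

-- ===== CLAIM (what is proved, stated in full; the proofs are below) =====
def Claim_equal_desenha_losango : Prop := ∀ (altura : Int), Dom_desenha_losango altura → Spec_desenha_losango altura (desenha_losango altura)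


-- ===== LEMMAS AND PROOFS =====

-- row builder shared by the reasoning (not by the ports)
def pvRow (esp est : Int) : String :=
  String.ofList (PySem.List.pyRepeat [' '] esp ++ PySem.List.pyRepeat ['#'] est)

lemma pvRow_congr {a b c d : Int} (h1 : a = c) (h2 : b = d) : pvRow a b = pvRow c d := by
  rw [h1, h2]

-- the heart: for h = 2*m+1, A's single full loop equals B's half + mirror
lemma diamond_eq (h m : Int) (hh : h = 2 * m + 1) :
    (PySem.List.pyRange 0 h 1).map (fun linha =>
      let ee := if linha ≤ m then (m - linha, linha * 2 + 1)
                else (linha - m, h - (linha - m) * 2)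
      String.ofList (PySem.List.pyRepeat [' '] ee.1 ++ PySem.List.pyRepeat ['#'] ee.2))
    = ((PySem.List.pyRange 0 (m + 1) 1).map (fun linha =>
        String.ofList (PySem.List.pyRepeat [' '] (m - linha) ++ PySem.List.pyRepeat ['#'] (2 * linha + 1))))
      ++ ((PySem.List.pyRange 0 (m + 1) 1).map (fun linha =>
        String.ofList (PySem.List.pyRepeat [' '] (m - linha) ++ PySem.List.pyRepeat ['#'] (2 * linha + 1)))).dropLast.reverse := by
  rcases lt_or_ge m 0 with hm | hm
  · rw [PySem.List.pyRange_one_eq_nil (by omega), PySem.List.pyRange_one_eq_nil (by omega)]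
    simp
  · rw [PySem.List.pyRange_one_append 0 (m + 1) h (by omega) (by omega), List.map_append]
    congr 1
    · refine List.map_congr_left (fun x hx => ?_)
      have hx' := (PySem.List.mem_pyRange_one).1 hx
      simp only [if_pos (show x ≤ m by omega)]
      show pvRow (m - x) (x * 2 + 1) = pvRow (m - x) (2 * x + 1)
      exact pvRow_congr rfl (by ring)
    · have hL : (PySem.List.pyRange (m + 1) h 1).map (fun linha =>
          let ee := if linha ≤ m then (m - linha, linha * 2 + 1)
                    else (linha - m, h - (linha - m) * 2)
          String.ofList (PySem.List.pyRepeat [' '] ee.1 ++ PySem.List.pyRepeat ['#'] ee.2))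
          = (PySem.List.pyRange (m + 1) h 1).map (fun x => pvRow (x - m) (h - (x - m) * 2)) := by
        refine List.map_congr_left (fun x hx => ?_)
        have hx' := (PySem.List.mem_pyRange_one).1 hx
        simp only [if_neg (show ¬ x ≤ m by omega)]
        rfl
      rw [hL]
      have hR : ((PySem.List.pyRange 0 (m + 1) 1).map (fun linha =>
          String.ofList (PySem.List.pyRepeat [' '] (m - linha) ++ PySem.List.pyRepeat ['#'] (2 * linha + 1))))
          = (PySem.List.pyRange 0 (m + 1) 1).map (fun x => pvRow (m - x) (2 * x + 1)) := rfl
      rw [hR]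
      apply List.ext_getElem
      · simp [PySem.List.length_pyRange_one]
        omega
      · intro k hk1 hk2
        simp only [List.length_map, PySem.List.length_pyRange_one] at hk1
        simp only [List.length_reverse, List.length_dropLast, List.length_map,
          PySem.List.length_pyRange_one] at hk2
        rw [List.getElem_map, PySem.List.getElem_pyRange_one, List.getElem_reverse,
            List.getElem_dropLast, List.getElem_map, PySem.List.getElem_pyRange_one]
        refine pvRow_congr ?_ ?_ <;>
        · simp only [List.length_dropLast, List.length_map, PySem.List.length_pyRange_one]
          omega

lemma odd_after_adjust (a : Int) :
    PySem.Int.mod (if PySem.Int.mod a 2 = 0 then a + 1 else a) 2 = 1 := by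
  have h1 := PySem.Int.mod_two_eq a
  have h2 := PySem.Int.mod_two_eq (a + 1)
  have d1 := PySem.Int.floordiv_mul_add_mod a 2
  have d2 := PySem.Int.floordiv_mul_add_mod (a + 1) 2
  split_ifs with hc
  · omega
  · omega

-- ===== VERDICT (by name: the statement is the Claim_ definition above) =====
theorem desenha_losango_spec : Claim_equal_desenha_losango := by
  intro altura _
  show desenha_losango altura = desenha_losango_alt altura
  unfold desenha_losango desenha_losango_alt
  have hodd := odd_after_adjust altura
  generalize hgen : (if PySem.Int.mod altura 2 = 0 then altura + 1 else altura) = h at hodd ⊢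
  have hdec := PySem.Int.floordiv_mul_add_mod h 2
  show (PySem.List.pyRange 0 h 1).foldl (fun linhas linha =>
      let ee := if linha ≤ PySem.Int.floordiv h 2 then (PySem.Int.floordiv h 2 - linha, linha * 2 + 1)
                else (linha - PySem.Int.floordiv h 2, h - (linha - PySem.Int.floordiv h 2) * 2)
      linhas ++ [String.ofList (PySem.List.pyRepeat [' '] ee.1 ++ PySem.List.pyRepeat ['#'] ee.2)]) []
    = ((PySem.List.pyRange 0 (PySem.Int.floordiv h 2 + 1) 1).map (fun linha =>
        String.ofList (PySem.List.pyRepeat [' '] (PySem.Int.floordiv h 2 - linha) ++ PySem.List.pyRepeat ['#'] (2 * linha + 1))))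
      ++ ((PySem.List.pyRange 0 (PySem.Int.floordiv h 2 + 1) 1).map (fun linha =>
        String.ofList (PySem.List.pyRepeat [' '] (PySem.Int.floordiv h 2 - linha) ++ PySem.List.pyRepeat ['#'] (2 * linha + 1)))).dropLast.reverse
  rw [PySem.List.foldl_append_singleton_eq_map]
  rw [List.nil_append]
  exact diamond_eq h (PySem.Int.floordiv h 2) (by omega)
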